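-- pv_equiv track=rewrite | github.com/benroywillis/Dash-Automate | tools/BasicBlockFrequencyHistogram.py | histFreq
-- ===== SOURCE A (Python) =====
-- def histFreq(blockFreq):
-- 	hist = {}
-- 	for freq in blockFreq.values():
-- 		if hist.get(freq) is None:
-- 			hist[freq] = 1
-- 		else:
-- 			hist[freq] += 1
-- 	return hist
-- ===== SOURCE B (Python) =====
-- def histFreq(blockFreq):
-- 	vals = list(blockFreq.values())
-- 	return {v: vals.count(v) for v in dict.fromkeys(vals)}
-- ===== Notes on version B (the rewrite author's own statement) =====
-- stated objective: alternative
-- what changed: Replaces the incremental per-value counter dict with a dedup-then-count strategy: take the distinct values in first-occurrence order and count each with list.count, building the histogram in one comprehension.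
import Mathlib
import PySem

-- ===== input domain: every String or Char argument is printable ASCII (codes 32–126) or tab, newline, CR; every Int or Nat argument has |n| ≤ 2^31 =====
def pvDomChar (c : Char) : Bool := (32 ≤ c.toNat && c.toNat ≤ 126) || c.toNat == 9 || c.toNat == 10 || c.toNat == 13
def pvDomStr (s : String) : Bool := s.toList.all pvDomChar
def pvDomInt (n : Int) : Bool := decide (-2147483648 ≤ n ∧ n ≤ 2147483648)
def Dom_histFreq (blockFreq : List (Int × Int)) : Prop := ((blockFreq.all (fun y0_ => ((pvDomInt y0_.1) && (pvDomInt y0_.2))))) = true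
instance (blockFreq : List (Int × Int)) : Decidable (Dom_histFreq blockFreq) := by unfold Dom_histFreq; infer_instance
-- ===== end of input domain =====

-- B builds the histogram by dedup-then-count instead of A's incremental counter; alternative decomposition, same results.
-- ===== PORT A =====
-- the incoming dict, as PySem.Dict (insertion order, unique keys)
def histFreq (blockFreq : List (Int × Int)) : List (Int × Int) :=
  let vals := (PySem.Dict.ofList blockFreq).values
  (vals.foldl (fun hist freq =>
      match hist.get? freq with
      | none => hist.insert freq 1          -- hist[freq] = 1
      | some v => hist.insert freq (v + 1)  -- hist[freq] += 1
    ) PySem.Dict.empty).items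

-- ===== PORT B =====
def histFreq_alt (blockFreq : List (Int × Int)) : List (Int × Int) :=
  let vals := (PySem.Dict.ofList blockFreq).values
  -- dict comprehension over dict.fromkeys(vals): keys are already distinct, so the items list is this map
  (PySem.List.dedup vals).map (fun v => (v, (vals.count v : Int)))

-- ===== PRECONDITION & SPEC =====
def Spec_histFreq (blockFreq : List (Int × Int)) (out : List (Int × Int)) : Prop := out = histFreq_alt blockFreq
instance (blockFreq : List (Int × Int)) (out : List (Int × Int)) : Decidable (Spec_histFreq blockFreq out) := by unfold Spec_histFreq; infer_instance

-- ===== CLAIM (what is proved, stated in full; the proofs are below) =====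
def Claim_equal_histFreq : Prop := ∀ (blockFreq : List (Int × Int)), Dom_histFreq blockFreq → Spec_histFreq blockFreq (histFreq blockFreq)

-- ===== LEMMAS AND PROOFS =====

-- ===== VERDICT (by name: the statement is the Claim_ definition above) =====
-- A's loop body is exactly the Counter step: insert freq (getD freq 0 + 1)
lemma step_eq (hist : PySem.Dict Int Int) (freq : Int) :
    (match hist.get? freq with
     | none => hist.insert freq 1
     | some v => hist.insert freq (v + 1)) =
    hist.insert freq (hist.getD freq 0 + 1) := by
  cases h : hist.get? freq <;> simp [PySem.Dict.getD, h]

theorem histFreq_spec : Claim_equal_histFreq := by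
  intro blockFreq _
  unfold Spec_histFreq histFreq histFreq_alt
  simp only []
  rw [funext (fun d => funext (fun x => step_eq d x)),
    PySem.Dict.foldl_insert_getD_add_one_eq_counter, PySem.Dict.items_counter,
    PySem.List.dedup_eq_ofList]
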